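-- pv_equiv track=rewrite | github.com/mhalle/gitstore | src/gitstore/sync.py | _filter_tree_conflicts
-- ===== SOURCE A (Python) =====
-- def _filter_tree_conflicts(
--     write_paths: set[str], deletes: list[str],
-- ) -> list[str]:
--     """Remove deletes that conflict with writes at file↔directory boundaries.
--
--     When a write replaces a tree with a blob (e.g. write ``foo``, delete
--     ``foo/bar``), the tree builder handles the replacement implicitly —
--     the delete is redundant and would cause a conflict in ``rebuild_tree``.
--     Similarly, when writes create a subtree that replaces a blob (e.g.
--     write ``foo/bar``, delete ``foo``), the delete is also redundant.
--     """
--     result: list[str] = []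
--     for d in deletes:
--         skip = False
--         for w in write_paths:
--             # write at foo, delete at foo/bar → skip (blob replaces tree)
--             if d.startswith(w + "/"):
--                 skip = True
--                 break
--             # write at foo/bar, delete at foo → skip (tree replaces blob)
--             if w.startswith(d + "/"):
--                 skip = True
--                 break
--         if not skip:
--             result.append(d)
--     return result
-- ===== SOURCE B (Python) =====
-- def _filter_tree_conflicts(
--     write_paths: set[str], deletes: list[str],
-- ) -> list[str]:
--     """One pass: index writes and all their slash-ancestors, then probe each
--     delete's own slash-prefixes — no write x delete product."""
--     def ancestors(p):
--         out = []
--         for i, ch in enumerate(p):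
--             if ch == '/':
--                 out.append(p[:i])
--         return out
--
--     writes = set(write_paths)
--     write_ancestors = set()
--     for w in writes:
--         write_ancestors.update(ancestors(w))
--
--     return [d for d in deletes
--             if d not in write_ancestors
--             and not any(p in writes for p in ancestors(d))]
-- ===== Notes on version B (the rewrite author's own statement) =====
-- stated objective: faster
-- what changed: Replaces the delete-times-write nested scan with hash-set indexing: build the set of writes and the set of all slash-ancestor prefixes of writes once, then decide each delete by probing its own slash-prefixes against those sets.
import Mathlib
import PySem

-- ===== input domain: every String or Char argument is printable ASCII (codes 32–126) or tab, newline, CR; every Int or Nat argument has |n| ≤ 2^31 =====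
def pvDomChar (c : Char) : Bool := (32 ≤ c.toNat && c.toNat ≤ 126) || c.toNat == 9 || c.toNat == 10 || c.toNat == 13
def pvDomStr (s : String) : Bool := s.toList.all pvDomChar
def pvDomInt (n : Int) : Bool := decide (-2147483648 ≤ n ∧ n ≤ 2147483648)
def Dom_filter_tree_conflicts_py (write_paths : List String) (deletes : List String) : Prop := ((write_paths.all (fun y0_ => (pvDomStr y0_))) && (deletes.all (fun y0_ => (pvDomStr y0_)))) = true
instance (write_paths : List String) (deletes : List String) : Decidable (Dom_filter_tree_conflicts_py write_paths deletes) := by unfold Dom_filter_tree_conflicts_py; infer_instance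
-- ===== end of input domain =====

-- B replaces A's delete×write nested scan by two hash sets (writes and all slash-ancestors
-- of writes) built once, probing each delete's own slash-prefixes: O((D+W)·L) vs O(D·W·L).


-- ===== PORT A =====
-- inner 'for w in write_paths' loop with skip/break: returns whether some write conflicts with d
def pvConflictsA (d : String) : List String → Bool
  | [] => false
  | w :: rest =>
    if PySem.Chars.startswith d.toList (w.toList ++ ['/']) then true
    else if PySem.Chars.startswith w.toList (d.toList ++ ['/']) then true
    else pvConflictsA d rest

def filter_tree_conflicts_py (write_paths : List String) (deletes : List String) : List String :=
  deletes.foldl (fun result d => if pvConflictsA d write_paths then result else result ++ [d]) []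

-- ===== PORT B =====
-- Source B's 'ancestors': for i, ch in enumerate(p): if ch == '/': out.append(p[:i])
def pvAncestors (p : List Char) : List (List Char) :=
  (PySem.List.enumerate p 0).foldl
    (fun out ic => if ic.2 == '/' then out ++ [PySem.List.slice p none (some ic.1)] else out) []

-- Source B's 'writes = set(write_paths)' (strings carried as their char lists)
def pvWrites (write_paths : List String) : PySem.Set (List Char) :=
  PySem.Set.ofList (write_paths.map (·.toList))

-- Source B's 'write_ancestors' accumulation loop
def pvWriteAncestors (write_paths : List String) : PySem.Set (List Char) :=
  (pvWrites write_paths).foldl (fun s w => PySem.Set.update s (pvAncestors w)) PySem.Set.empty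

def filter_tree_conflicts_py_alt (write_paths : List String) (deletes : List String) : List String :=
  deletes.filter (fun d =>
    !((pvWriteAncestors write_paths).contains d.toList) &&
    !((pvAncestors d.toList).any (fun p => (pvWrites write_paths).contains p)))

-- ===== PRECONDITION & SPEC =====
def Spec_filter_tree_conflicts_py (write_paths : List String) (deletes : List String) (out : List String) : Prop := out = filter_tree_conflicts_py_alt write_paths deletes
instance (write_paths : List String) (deletes : List String) (out : List String) : Decidable (Spec_filter_tree_conflicts_py write_paths deletes out) := by unfold Spec_filter_tree_conflicts_py; infer_instance

-- ===== CLAIM (what is proved, stated in full; the proofs are below) =====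
def Claim_equal_filter_tree_conflicts_py : Prop := ∀ (write_paths : List String) (deletes : List String), Dom_filter_tree_conflicts_py write_paths deletes → Spec_filter_tree_conflicts_py write_paths deletes (filter_tree_conflicts_py write_paths deletes)

-- ===== LEMMAS AND PROOFS =====

-- q is produced by pvAncestors p exactly when q ++ "/" is a prefix of p
theorem mem_pvAncestors (p q : List Char) : q ∈ pvAncestors p ↔ q ++ ['/'] <+: p := by
  unfold pvAncestors
  rw [PySem.List.foldl_append_if (fun ic : Int × Char => ic.2 == '/')
      (fun ic : Int × Char => PySem.List.slice p none (some ic.1))]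
  simp only [List.nil_append, List.mem_map, List.mem_filter,
    PySem.List.mem_enumerate_iff]
  constructor
  · rintro ⟨ic, ⟨⟨k, hk, rfl⟩, hc⟩, hq⟩
    have hslash : p[k] = '/' := by simpa using hc
    rw [PySem.List.slice_to p (by positivity)] at hq
    have hq' : q = p.take k := by rw [← hq]; simp
    have : q ++ ['/'] = p.take (k + 1) := by
      rw [List.take_add_one, hq']
      simp [List.getElem?_eq_getElem hk, hslash]
    rw [this]; exact List.take_prefix _ _
  · rintro ⟨t, ht⟩
    have hk : q.length < p.length := by rw [← ht]; simp
    have hget : p[q.length]'hk = '/' := by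
      subst ht
      rw [List.getElem_append_left (bs := t) (by simp), List.getElem_append_right (Nat.le_refl q.length)]
      simp
    refine ⟨((0 : Int) + (q.length : Int), '/'), ⟨⟨q.length, hk, by rw [hget]⟩, by simp⟩, ?_⟩
    rw [PySem.List.slice_to p (by positivity)]
    subst ht
    simp

theorem pvConflictsA_cons (d w : String) (rest : List String) :
    pvConflictsA d (w :: rest) =
      (PySem.Chars.startswith d.toList (w.toList ++ ['/']) ||
       PySem.Chars.startswith w.toList (d.toList ++ ['/']) ||
       pvConflictsA d rest) := by
  rw [pvConflictsA]
  cases h1 : PySem.Chars.startswith d.toList (w.toList ++ ['/']) <;>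
    cases h2 : PySem.Chars.startswith w.toList (d.toList ++ ['/']) <;> simp

-- A's inner loop is the existential over write_paths
theorem pvConflictsA_iff (d : String) (ws : List String) :
    pvConflictsA d ws = true ↔
      ∃ w ∈ ws, (w.toList ++ ['/'] <+: d.toList) ∨ (d.toList ++ ['/'] <+: w.toList) := by
  induction ws with
  | nil => simp [pvConflictsA]
  | cons w rest ih =>
    rw [pvConflictsA_cons]
    simp only [Bool.or_eq_true, PySem.Chars.startswith_iff, ih, List.mem_cons]
    aesop

theorem mem_update {α : Type} [BEq α] [LawfulBEq α] (s : PySem.Set α) (xs : List α) (y : α) :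
    y ∈ PySem.Set.update s xs ↔ y ∈ s ∨ y ∈ xs := by
  induction xs generalizing s with
  | nil => simp [PySem.Set.update]
  | cons x t ih =>
    show y ∈ PySem.Set.update (s.add x) t ↔ _
    rw [ih, PySem.Set.mem_add]
    simp only [List.mem_cons]
    tauto

theorem mem_pvWrites (wp : List String) (x : List Char) :
    x ∈ pvWrites wp ↔ ∃ w ∈ wp, x = w.toList := by
  unfold pvWrites
  rw [PySem.Set.mem_ofList]
  simp [eq_comm]

theorem mem_pvWriteAncestors (wp : List String) (x : List Char) :
    x ∈ pvWriteAncestors wp ↔ ∃ w ∈ wp, x ∈ pvAncestors w.toList := by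
  unfold pvWriteAncestors
  have key : ∀ (l : List (List Char)) (s0 : PySem.Set (List Char)),
      x ∈ l.foldl (fun s w => PySem.Set.update s (pvAncestors w)) s0 ↔
        x ∈ s0 ∨ ∃ w ∈ l, x ∈ pvAncestors w := by
    intro l
    induction l with
    | nil => simp
    | cons w t ih =>
      intro s0
      simp only [List.foldl_cons, ih, mem_update, List.mem_cons]
      aesop
  rw [key]
  have : x ∈ (PySem.Set.empty : PySem.Set (List Char)) ↔ False := by
    simp [PySem.Set.empty]
  rw [this, false_or]
  constructor
  · rintro ⟨v, hv, hx⟩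
    obtain ⟨w, hw, rfl⟩ := (mem_pvWrites wp v).mp hv
    exact ⟨w, hw, hx⟩
  · rintro ⟨w, hw, hx⟩
    exact ⟨w.toList, (mem_pvWrites wp _).mpr ⟨w, hw, rfl⟩, hx⟩

theorem contains_iff {α : Type} [BEq α] [LawfulBEq α] (s : PySem.Set α) (x : α) :
    s.contains x = true ↔ x ∈ s := by simp [PySem.Set.contains]

theorem pred_eq (wp : List String) (d : String) :
    (!((pvWriteAncestors wp).contains d.toList) &&
      !((pvAncestors d.toList).any (fun p => (pvWrites wp).contains p))) =
    !pvConflictsA d wp := by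
  have h : ((pvWriteAncestors wp).contains d.toList ||
      (pvAncestors d.toList).any (fun p => (pvWrites wp).contains p)) = pvConflictsA d wp := by
    rw [Bool.eq_iff_iff, Bool.or_eq_true, pvConflictsA_iff]
    constructor
    · rintro (h1 | h2)
      · obtain ⟨w, hw, hx⟩ := (mem_pvWriteAncestors wp _).mp ((contains_iff _ _).mp h1)
        exact ⟨w, hw, Or.inr ((mem_pvAncestors _ _).mp hx)⟩
      · obtain ⟨x, hx, hcw⟩ := List.any_eq_true.mp h2
        obtain ⟨w, hw, rfl⟩ := (mem_pvWrites wp _).mp ((contains_iff _ _).mp hcw)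
        exact ⟨w, hw, Or.inl ((mem_pvAncestors _ _).mp hx)⟩
    · rintro ⟨w, hw, h | h⟩
      · refine Or.inr (List.any_eq_true.mpr ⟨w.toList, (mem_pvAncestors _ _).mpr h, ?_⟩)
        exact (contains_iff _ _).mpr ((mem_pvWrites wp _).mpr ⟨w, hw, rfl⟩)
      · exact Or.inl ((contains_iff _ _).mpr
          ((mem_pvWriteAncestors wp _).mpr ⟨w, hw, (mem_pvAncestors _ _).mpr h⟩))
  rw [← h, Bool.not_or]

-- A's outer loop builds exactly the filter of the non-conflicting deletes
theorem portA_eq_filter (wp ds : List String) :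
    filter_tree_conflicts_py wp ds = ds.filter (fun d => !pvConflictsA d wp) := by
  unfold filter_tree_conflicts_py
  have hf : (fun (result : List String) (d : String) =>
      if pvConflictsA d wp then result else result ++ [d]) =
      (fun result d => if (!pvConflictsA d wp) = true then result ++ [id d] else result) := by
    funext result d
    cases h : pvConflictsA d wp <;> simp
  rw [hf, PySem.List.foldl_append_if (fun d => !pvConflictsA d wp) id]
  simp

-- ===== VERDICT (by name: the statement is the Claim_ definition above) =====
theorem filter_tree_conflicts_py_spec : Claim_equal_filter_tree_conflicts_py := by
  intro wp ds _
  show filter_tree_conflicts_py wp ds = filter_tree_conflicts_py_alt wp ds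
  rw [portA_eq_filter]
  unfold filter_tree_conflicts_py_alt
  exact List.filter_congr (fun d _ => (pred_eq wp d).symm)
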